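-- pv_equiv track=rewrite | github.com/yyoud/userlib2 | Userlib/userlib.py | maj2
-- ===== SOURCE A (Python) =====
-- def maj2(hex_list):
--     n = len(hex_list)
--     xor_result = 0
--
--     # Iterate over all pairs of elements in the list
--     for i in range(n):
--         for j in range(i + 1, n):
--             # Compute AND operation for each pair
--             and_result = hex_list[i] & hex_list[j]
--             # XOR the result into the final result
--             xor_result ^= and_result
--
--     # Mask to ensure result is 32-bit
--     return xor_result & 0xFFFFFFFF
-- ===== SOURCE B (Python) =====
-- def maj2(hex_list):
--     # One pass, right to left: AND distributes over XOR, so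
--     # XOR_{j>i} (a_i & a_j) = a_i & (XOR_{j>i} a_j).
--     xor_result = 0
--     suffix_xor = 0
--     for x in reversed(hex_list):
--         xor_result ^= x & suffix_xor
--         suffix_xor ^= x
--     return xor_result & 0xFFFFFFFF
-- ===== Notes on version B (the rewrite author's own statement) =====
-- stated objective: faster
-- what changed: Replaces the O(n^2) double loop over all pairs by a single right-to-left pass keeping a running suffix XOR, using that AND distributes over XOR (XOR_{j>i} (a_i & a_j) = a_i & suffix_xor).
import Mathlib
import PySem

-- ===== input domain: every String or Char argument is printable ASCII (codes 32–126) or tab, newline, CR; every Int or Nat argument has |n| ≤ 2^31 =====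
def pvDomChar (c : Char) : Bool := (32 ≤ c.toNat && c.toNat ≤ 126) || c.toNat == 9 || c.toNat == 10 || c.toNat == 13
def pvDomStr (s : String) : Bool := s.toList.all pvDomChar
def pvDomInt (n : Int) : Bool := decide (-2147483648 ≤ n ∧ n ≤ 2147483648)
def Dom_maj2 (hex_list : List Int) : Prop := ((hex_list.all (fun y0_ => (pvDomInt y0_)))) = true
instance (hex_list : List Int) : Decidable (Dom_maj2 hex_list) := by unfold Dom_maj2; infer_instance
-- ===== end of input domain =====

-- B replaces A's O(n^2) pair loop by one right-to-left pass with a running suffix XOR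
-- (AND distributes over XOR); proved to return the same value on every input.


-- ===== PORT A =====
def maj2 (hex_list : List Int) : Int :=
  let n : Int := PySem.List.len hex_list
  let xor_result : Int :=
    (PySem.List.pyRange 0 n).foldl (fun acc i =>
      (PySem.List.pyRange (i + 1) n).foldl (fun acc2 j =>
        PySem.Int.bxor acc2
          (PySem.Int.band (PySem.List.pyGetD hex_list i 0) (PySem.List.pyGetD hex_list j 0)))
        acc) 0
  PySem.Int.band xor_result 0xFFFFFFFF

-- ===== PORT B =====
def maj2_alt (hex_list : List Int) : Int :=
  let p : Int × Int :=
    hex_list.reverse.foldl (fun (st : Int × Int) x =>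
      (PySem.Int.bxor st.1 (PySem.Int.band x st.2), PySem.Int.bxor st.2 x)) (0, 0)
  PySem.Int.band p.1 0xFFFFFFFF

-- ===== PRECONDITION & SPEC =====
def Spec_maj2 (hex_list : List Int) (out : Int) : Prop := out = maj2_alt hex_list
instance (hex_list : List Int) (out : Int) : Decidable (Spec_maj2 hex_list out) := by unfold Spec_maj2; infer_instance

-- ===== CLAIM (what is proved, stated in full; the proofs are below) =====
def Claim_equal_maj2 : Prop := ∀ (hex_list : List Int), Dom_maj2 hex_list → Spec_maj2 hex_list (maj2 hex_list)

-- ===== LEMMAS AND PROOFS =====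

-- XOR of the whole list.
def xorAll (xs : List Int) : Int := xs.foldr PySem.Int.bxor 0

-- XOR over all pairs i < j of (xs[i] & xs[j]), by structural recursion.
def pairXor : List Int → Int
  | [] => 0
  | x :: t => PySem.Int.bxor (PySem.Int.band x (xorAll t)) (pairXor t)

-- (m &&& n) + ldiff m n = m  (the bits of m&&&n are a subset of m's bits)
theorem and_add_ldiff : ∀ m n : ℕ, (m &&& n) + Nat.ldiff m n = m := by
  intro m
  induction m using Nat.strong_induction_on with
  | _ m ih =>
    intro n
    rcases Nat.eq_zero_or_pos m with h | h
    · subst h; simp [Nat.ldiff]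
    · have h2 : m / 2 < m := Nat.div_lt_self h (by norm_num)
      have hA : (m &&& n) / 2 = m / 2 &&& n / 2 := Nat.and_div_two
      have hL : Nat.ldiff m n / 2 = Nat.ldiff (m / 2) (n / 2) := by
        have := Nat.bitwise_div_two_pow (f := fun a b => a && !b) (x := m) (y := n) (n := 1)
        simpa [Nat.ldiff] using this
      have hAm : (m &&& n) % 2 = (m % 2) &&& (n % 2) := by
        have := Nat.bitwise_mod_two_pow (f := and) (x := m) (y := n) (n := 1)
        simpa [HAnd.hAnd, AndOp.and, Nat.land] using this
      have hLm : Nat.ldiff m n % 2 = Nat.ldiff (m % 2) (n % 2) := by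
        have := Nat.bitwise_mod_two_pow (f := fun a b => a && !b) (x := m) (y := n) (n := 1)
        simpa [Nat.ldiff] using this
      have ihh := ih (m / 2) h2 (n / 2)
      have hm2 : m % 2 = 0 ∨ m % 2 = 1 := Nat.mod_two_eq_zero_or_one m
      have hn2 : n % 2 = 0 ∨ n % 2 = 1 := Nat.mod_two_eq_zero_or_one n
      have hmod : (m &&& n) % 2 + Nat.ldiff m n % 2 = m % 2 := by
        rw [hAm, hLm]
        rcases hm2 with h1 | h1 <;> rcases hn2 with h2' | h2' <;>
          rw [h1, h2'] <;> simp [Nat.ldiff, Nat.bitwise, HAnd.hAnd, AndOp.and, Nat.land]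
      omega

-- PySem's Python-exact band/bxor agree with Mathlib's Int.land / Int.xor.
theorem pyband_eq_land (a b : Int) : PySem.Int.band a b = Int.land a b := by
  cases a with
  | ofNat m =>
    have ha : (0:Int) ≤ Int.ofNat m := Int.ofNat_nonneg m
    cases b with
    | ofNat n =>
      simp only [PySem.Int.band, if_pos ha]
      rfl
    | negSucc n =>
      have hb : ¬ (0:Int) ≤ Int.negSucc n := by rw [Int.negSucc_eq]; omega
      have ht : (-(Int.negSucc n) - 1).toNat = n := by rw [Int.negSucc_eq]; omega
      have htm : ((m : Int)).toNat = m := rfl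
      have hl : Int.land (↑m) (Int.negSucc n) = (↑(Nat.ldiff m n) : Int) := rfl
      simp only [PySem.Int.band, if_neg hb, ht, htm, hl, Int.ofNat_eq_coe]
      have := and_add_ldiff m n
      have h2 : m &&& n ≤ m := Nat.and_le_left
      omega
  | negSucc m =>
    have ha : ¬ (0:Int) ≤ Int.negSucc m := by rw [Int.negSucc_eq]; omega
    have ha' : (-(Int.negSucc m) - 1).toNat = m := by rw [Int.negSucc_eq]; omega
    cases b with
    | ofNat n =>
      have hb : (0:Int) ≤ Int.ofNat n := Int.ofNat_nonneg n
      have htn : ((n : Int)).toNat = n := rfl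
      have hl : Int.land (Int.negSucc m) (↑n) = (↑(Nat.ldiff n m) : Int) := rfl
      simp only [PySem.Int.band, if_neg ha, ha', htn, hl, Int.ofNat_eq_coe]
      have := and_add_ldiff n m
      have h2 : n &&& m ≤ n := Nat.and_le_left
      omega
    | negSucc n =>
      have hb : ¬ (0:Int) ≤ Int.negSucc n := by rw [Int.negSucc_eq]; omega
      have hb' : (-(Int.negSucc n) - 1).toNat = n := by rw [Int.negSucc_eq]; omega
      have hl : Int.land (Int.negSucc m) (Int.negSucc n) = Int.negSucc (m ||| n) := rfl
      simp only [PySem.Int.band, if_neg ha, if_neg hb, ha', hb', hl]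
      rw [Int.negSucc_eq]; ring

theorem pybxor_eq_xor (a b : Int) : PySem.Int.bxor a b = Int.xor a b := by
  cases a with
  | ofNat m =>
    have ha : (0:Int) ≤ Int.ofNat m := Int.ofNat_nonneg m
    have htm : ((m : Int)).toNat = m := rfl
    have htm' : (Int.ofNat m).toNat = m := rfl
    cases b with
    | ofNat n =>
      simp only [PySem.Int.bxor, if_pos ha]
      rfl
    | negSucc n =>
      have hb : ¬ (0:Int) ≤ Int.negSucc n := by rw [Int.negSucc_eq]; omega
      have hb' : (-(Int.negSucc n) - 1).toNat = n := by rw [Int.negSucc_eq]; omega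
      have hl : Int.xor (Int.ofNat m) (Int.negSucc n) = Int.negSucc (m ^^^ n) := rfl
      simp only [PySem.Int.bxor, if_pos ha, if_neg hb, htm', hb', hl]
      rw [Int.negSucc_eq]; ring
  | negSucc m =>
    have ha : ¬ (0:Int) ≤ Int.negSucc m := by rw [Int.negSucc_eq]; omega
    have ha' : (-(Int.negSucc m) - 1).toNat = m := by rw [Int.negSucc_eq]; omega
    cases b with
    | ofNat n =>
      have hb : (0:Int) ≤ Int.ofNat n := Int.ofNat_nonneg n
      have htn : ((n : Int)).toNat = n := rfl
      have htn' : (Int.ofNat n).toNat = n := rfl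
      have hl : Int.xor (Int.negSucc m) (Int.ofNat n) = Int.negSucc (m ^^^ n) := rfl
      simp only [PySem.Int.bxor, if_neg ha, if_pos hb, ha', htn', hl]
      rw [Int.negSucc_eq]; ring
    | negSucc n =>
      have hb : ¬ (0:Int) ≤ Int.negSucc n := by rw [Int.negSucc_eq]; omega
      have hb' : (-(Int.negSucc n) - 1).toNat = n := by rw [Int.negSucc_eq]; omega
      have hl : Int.xor (Int.negSucc m) (Int.negSucc n) = Int.ofNat (m ^^^ n) := rfl
      simp only [PySem.Int.bxor, if_neg ha, if_neg hb, ha', hb', hl]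
      rfl

-- extensionality for Int by test bits
theorem int_eq_of_testBit_eq {a b : Int} (h : ∀ k, a.testBit k = b.testBit k) : a = b := by
  cases a with
  | ofNat m =>
    cases b with
    | ofNat n =>
      have : m = n := Nat.eq_of_testBit_eq fun k => h k
      simp [this]
    | negSucc n =>
      exfalso
      have hk := h (m + n)
      have h1 : Nat.testBit m (m + n) = false :=
        Nat.testBit_lt_two_pow (lt_of_lt_of_le (Nat.lt_two_pow_self)
          (Nat.pow_le_pow_right (by norm_num) (Nat.le_add_right m n)))
      have h2 : Nat.testBit n (m + n) = false :=
        Nat.testBit_lt_two_pow (lt_of_lt_of_le (Nat.lt_two_pow_self)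
          (Nat.pow_le_pow_right (by norm_num) (Nat.le_add_left n m)))
      simp [Int.testBit, h1, h2] at hk
  | negSucc m =>
    cases b with
    | ofNat n =>
      exfalso
      have hk := h (m + n)
      have h1 : Nat.testBit m (m + n) = false :=
        Nat.testBit_lt_two_pow (lt_of_lt_of_le (Nat.lt_two_pow_self)
          (Nat.pow_le_pow_right (by norm_num) (Nat.le_add_right m n)))
      have h2 : Nat.testBit n (m + n) = false :=
        Nat.testBit_lt_two_pow (lt_of_lt_of_le (Nat.lt_two_pow_self)
          (Nat.pow_le_pow_right (by norm_num) (Nat.le_add_left n m)))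
      simp [Int.testBit, h1, h2] at hk
    | negSucc n =>
      have : m = n := Nat.eq_of_testBit_eq fun k => by
        have hk := h k
        simpa [Int.testBit] using hk
      simp [this]

theorem bxor_assoc' (a b c : Int) :
    PySem.Int.bxor (PySem.Int.bxor a b) c = PySem.Int.bxor a (PySem.Int.bxor b c) := by
  simp only [pybxor_eq_xor]
  exact int_eq_of_testBit_eq fun k => by
    simp [Int.testBit_lxor]

theorem band_bxor_distrib (x a b : Int) :
    PySem.Int.band x (PySem.Int.bxor a b)
      = PySem.Int.bxor (PySem.Int.band x a) (PySem.Int.band x b) := by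
  simp only [pybxor_eq_xor, pyband_eq_land]
  exact int_eq_of_testBit_eq fun k => by
    simp [Int.testBit_lxor, Int.testBit_land, Bool.and_xor_distrib_left]

-- A's inner loop, folded over a plain list: acc XOR (x & xorAll l)
theorem foldl_bxor_band (x : Int) (l : List Int) (acc : Int) :
    l.foldl (fun a y => PySem.Int.bxor a (PySem.Int.band x y)) acc
      = PySem.Int.bxor acc (PySem.Int.band x (xorAll l)) := by
  induction l generalizing acc with
  | nil => simp [xorAll, PySem.Int.band_zero, PySem.Int.bxor_zero]
  | cons y t ih =>
    simp only [List.foldl_cons, ih, xorAll, List.foldr_cons]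
    rw [bxor_assoc', ← band_bxor_distrib]

-- A's outer loop from index a equals pairXor of the suffix.
theorem pyRange_nil {a b : Int} (h : b ≤ a) : PySem.List.pyRange a b = [] := by
  simp [PySem.List.pyRange, show ¬ a < b by omega]

theorem outerLoop (xs : List Int) : ∀ (k a : Nat) (acc : Int), xs.length - a = k →
    (PySem.List.pyRange (a : Int) (PySem.List.len xs)).foldl (fun acc i =>
      (PySem.List.pyRange (i + 1) (PySem.List.len xs)).foldl (fun acc2 j =>
        PySem.Int.bxor acc2
          (PySem.Int.band (PySem.List.pyGetD xs i 0) (PySem.List.pyGetD xs j 0)))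
        acc) acc
      = PySem.Int.bxor acc (pairXor (xs.drop a)) := by
  intro k
  induction k with
  | zero =>
    intro a acc hk
    have hlen : xs.length ≤ a := by omega
    rw [PySem.List.len_eq, pyRange_nil (by exact_mod_cast hlen), List.foldl_nil,
      List.drop_eq_nil_of_le hlen]
    simp [pairXor, PySem.Int.bxor_zero]
  | succ k ih =>
    intro a acc hk
    have halt : a < xs.length := by omega
    have ha' : (a : Int) < PySem.List.len xs := by
      rw [PySem.List.len_eq]; exact_mod_cast halt
    rw [PySem.List.pyRange_one_cons ha', List.foldl_cons]
    rw [PySem.List.foldl_pyRange_pyGetD xs 0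
      (fun a2 y => PySem.Int.bxor a2 (PySem.Int.band (PySem.List.pyGetD xs (a : Int) 0) y))
      acc (a := (a : Int) + 1) (by positivity)]
    have ht : ((a : Int) + 1).toNat = a + 1 := by omega
    rw [ht, foldl_bxor_band]
    have hcast : (a : Int) + 1 = ((a + 1 : ℕ) : Int) := by push_cast; ring
    rw [hcast, ih (a + 1) _ (by omega)]
    have hget : PySem.List.pyGetD xs (a : Int) 0 = xs.getD a 0 :=
      PySem.List.pyGetD_natCast xs a 0
    have hdrop : xs.drop a = xs.getD a 0 :: xs.drop (a + 1) := by
      rw [List.drop_eq_getElem_cons halt, List.getD_eq_getElem xs 0 halt]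
    rw [hget, hdrop]
    show PySem.Int.bxor (PySem.Int.bxor acc _) _ = _
    rw [bxor_assoc']
    rfl

-- B's fold computes (pairXor, xorAll).
theorem bFold (xs : List Int) :
    xs.foldr (fun x (st : Int × Int) =>
        (PySem.Int.bxor st.1 (PySem.Int.band x st.2), PySem.Int.bxor st.2 x)) (0, 0)
      = (pairXor xs, xorAll xs) := by
  induction xs with
  | nil => rfl
  | cons x t ih =>
    simp only [List.foldr_cons, ih, pairXor, xorAll, List.foldr_cons]
    exact Prod.ext (PySem.Int.bxor_comm _ _) (PySem.Int.bxor_comm _ _)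

-- ===== VERDICT (by name: the statement is the Claim_ definition above) =====
theorem maj2_spec : Claim_equal_maj2 := by
  intro xs _
  unfold Spec_maj2 maj2 maj2_alt
  dsimp only
  rw [List.foldl_reverse]
  have hb := bFold xs
  have ha := outerLoop xs xs.length 0 0 (by simp)
  simp only [Int.natCast_zero] at ha
  rw [ha, hb]
  rw [PySem.Int.bxor_comm, PySem.Int.bxor_zero]
  simp
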